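-- pv_equiv track=rewrite | github.com/GuyInHaze/cryptography | utils/doublezigzagencryption.py | _zigzag_shuffle
-- ===== SOURCE A (Python) =====
-- def _zigzag_shuffle(text: str, direction: int) -> str:
--     """Зигзагообразное перемешивание символов"""
--     if len(text) <= 1:
--         return text
--
--     result = []
--     left, right = 0, len(text) - 1
--
--     while left <= right:
--         if direction > 0:
--             # Прямой зигзаг: сначала левый, потом правый символ
--             if left <= right:
--                 result.append(text[left])
--             if left != right:
--                 result.append(text[right])
--         else:
--             # Обратный зигзаг: сначала правый, потом левый символ
--             if left <= right:
--                 result.append(text[right])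
--             if left != right:
--                 result.append(text[left])
--         left += 1
--         right -= 1
--
--     return ''.join(result)
-- ===== SOURCE B (Python) =====
-- def _zigzag_shuffle(text: str, direction: int) -> str:
--     """Zigzag interleave via zip of the string with its reverse, truncated to len(text)."""
--     if len(text) <= 1:
--         return text
--     rev = text[::-1]
--     pairs = zip(text, rev) if direction > 0 else zip(rev, text)
--     return ''.join(c for p in pairs for c in p)[:len(text)]
-- ===== Notes on version B (the rewrite author's own statement) =====
-- stated objective: simpler
-- what changed: Replaces the two-pointer while-loop with its per-iteration left/right index bookkeeping and four conditionals by a closed pipeline: zip the string with its reverse (order of the pair chosen by direction), flatten the pairs, and truncate to len(text), which handles the odd-length middle character by truncation instead of the left != right guard.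
import Mathlib
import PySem

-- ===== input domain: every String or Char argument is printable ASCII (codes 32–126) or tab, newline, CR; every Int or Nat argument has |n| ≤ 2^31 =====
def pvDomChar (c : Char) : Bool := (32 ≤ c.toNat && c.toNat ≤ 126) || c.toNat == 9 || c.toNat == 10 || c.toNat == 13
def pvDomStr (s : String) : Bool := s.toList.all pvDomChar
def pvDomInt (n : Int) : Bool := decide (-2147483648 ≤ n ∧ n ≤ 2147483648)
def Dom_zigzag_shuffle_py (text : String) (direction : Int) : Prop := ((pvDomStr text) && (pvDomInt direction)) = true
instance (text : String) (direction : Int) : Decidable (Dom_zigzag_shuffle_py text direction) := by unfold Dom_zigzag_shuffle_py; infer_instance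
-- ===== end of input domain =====

-- B replaces A's two-pointer loop with zip(text, reversed(text)) flattened and truncated to len(text); objective: simpler.


-- ===== PORT A =====
-- while-loop of A; `left`/`right` always index in range while the loop runs, so the `.getD ' '`
-- default (pyGet? = Python indexing, none = IndexError) is never taken on any reachable state.
def zzLoopA (l : List Char) (direction left right : Int) (result : List Char) : List Char :=
  if left ≤ right then
    let result :=
      if direction > 0 then
        let r := if left ≤ right then result ++ [(PySem.List.pyGet? l left).getD ' '] else result
        if left ≠ right then r ++ [(PySem.List.pyGet? l right).getD ' '] else r
      else
        let r := if left ≤ right then result ++ [(PySem.List.pyGet? l right).getD ' '] else result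
        if left ≠ right then r ++ [(PySem.List.pyGet? l left).getD ' '] else r
    zzLoopA l direction (left + 1) (right - 1) result
  else result
termination_by (right + 1 - left).toNat
decreasing_by simp_wf; omega

def zigzag_shuffle_py (text : String) (direction : Int) : String :=
  if PySem.Str.len text ≤ 1 then text
  else String.ofList (zzLoopA text.toList direction 0 (PySem.Str.len text - 1) [])

-- ===== PORT B =====
def zigzag_shuffle_py_alt (text : String) (direction : Int) : String :=
  if PySem.Str.len text ≤ 1 then text
  else
    let l := text.toList
    -- rev = text[::-1]; step -1 ≠ 0, so slice? never returns none
    let rev := match PySem.Str.slice? text none none (-1) with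
      | some r => r.toList
      | none => []
    let pairs := if direction > 0 then l.zip rev else rev.zip l
    String.ofList ((pairs.flatMap (fun p => [p.1, p.2])).take l.length)

-- ===== PRECONDITION & SPEC =====
def Spec_zigzag_shuffle_py (text : String) (direction : Int) (out : String) : Prop := out = zigzag_shuffle_py_alt text direction
instance (text : String) (direction : Int) (out : String) : Decidable (Spec_zigzag_shuffle_py text direction out) := by unfold Spec_zigzag_shuffle_py; infer_instance

-- ===== CLAIM (what is proved, stated in full; the proofs are below) =====
def Claim_equal_zigzag_shuffle_py : Prop := ∀ (text : String) (direction : Int), Dom_zigzag_shuffle_py text direction → Spec_zigzag_shuffle_py text direction (zigzag_shuffle_py text direction)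

-- ===== LEMMAS AND PROOFS =====

-- peel one char off each end; common characterisation of both programs
def zz (d : Int) : List Char → List Char
  | [] => []
  | [a] => [a]
  | a :: c :: rest =>
      (if d > 0 then [a, (c :: rest).getLastD ' '] else [(c :: rest).getLastD ' ', a])
        ++ zz d (c :: rest).dropLast
termination_by seg => seg.length
decreasing_by simp [List.length_dropLast]

lemma zz_cons_concat (d : Int) (a b : Char) (m : List Char) :
    zz d (a :: (m ++ [b])) = (if d > 0 then [a, b] else [b, a]) ++ zz d m := by
  cases m with
  | nil => simp [zz]
  | cons c m' =>
    show zz d (a :: c :: (m' ++ [b])) = _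
    rw [zz]
    have h1 : (c :: (m' ++ [b])).getLastD ' ' = b := by
      rw [show c :: (m' ++ [b]) = (c :: m') ++ [b] from rfl, List.getLastD_concat]
    have h2 : (c :: (m' ++ [b])).dropLast = c :: m' := by
      rw [show c :: (m' ++ [b]) = (c :: m') ++ [b] by simp]
      exact List.dropLast_concat
    rw [h1, h2]

lemma zzLoopA_eq (d : Int) :
    ∀ (seg pre post acc : List Char) (left right : Int),
      left = (pre.length : Int) → right = left + seg.length - 1 →
      zzLoopA (pre ++ seg ++ post) d left right acc = acc ++ zz d seg := by
  intro seg
  induction seg using List.bidirectionalRec with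
  | nil =>
    intro pre post acc left right hl hr
    rw [zzLoopA, if_neg (by simp at hr; omega)]
    simp [zz]
  | singleton a =>
    intro pre post acc left right hl hr
    have hr' : right = left := by simp at hr; omega
    subst hr' hl
    rw [zzLoopA, if_pos le_rfl]
    rw [zzLoopA, if_neg (by omega)]
    by_cases hd : d > 0 <;> simp [zz, hd]
  | cons_append a m b ih =>
    intro pre post acc left right hl hr
    have hr' : right = left + m.length + 1 := by simp at hr; omega
    subst hl hr'
    rw [show pre ++ (a :: (m ++ [b])) ++ post = (pre ++ [a]) ++ m ++ ([b] ++ post) by simp]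
    have hcond : (pre.length : Int) ≤ (pre.length : Int) + m.length + 1 := by
      have : (0:Int) ≤ m.length := Int.natCast_nonneg _
      omega
    have hne : (pre.length : Int) ≠ (pre.length : Int) + m.length + 1 := by
      have : (0:Int) ≤ m.length := Int.natCast_nonneg _
      omega
    have hgetl : (PySem.List.pyGet? ((pre ++ [a]) ++ m ++ ([b] ++ post)) ((pre.length : Nat) : Int)).getD ' ' = a := by
      rw [PySem.List.pyGet?_natCast]
      rw [show (pre ++ [a]) ++ m ++ ([b] ++ post) = pre ++ ([a] ++ (m ++ ([b] ++ post))) by simp]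
      rw [List.getElem?_append_right (by omega)]
      simp
    have hgetr : (PySem.List.pyGet? ((pre ++ [a]) ++ m ++ ([b] ++ post)) ((pre.length : Int) + m.length + 1)).getD ' ' = b := by
      rw [show ((pre.length : Int) + m.length + 1) = (((pre.length + m.length + 1 : Nat) : Nat) : Int) by push_cast; ring]
      rw [PySem.List.pyGet?_natCast]
      rw [show (pre ++ [a]) ++ m ++ ([b] ++ post) = (pre ++ [a] ++ m) ++ ([b] ++ post) by simp]
      rw [List.getElem?_append_right (by simp; omega)]
      simp
    have hrec := fun acc' => ih (pre ++ [a]) ([b] ++ post) acc'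
      ((pre.length : Int) + 1) ((pre.length : Int) + m.length + 1 - 1)
      (by simp) (by ring)
    rw [zzLoopA, if_pos hcond]
    rw [zz_cons_concat]
    by_cases hd : d > 0
    · simp only [hd, if_pos, hcond, hne, ne_eq, not_false_iff, hgetl, hgetr]
      rw [hrec (acc ++ [a] ++ [b])]
      simp
    · simp only [hd, if_false, hcond, hne, ne_eq, not_false_iff, if_true, hgetl, hgetr]
      rw [hrec (acc ++ [b] ++ [a])]
      simp

lemma zz_eq_take (d : Int) :
    ∀ seg : List Char,
      zz d seg
        = ((if d > 0 then seg.zip seg.reverse else seg.reverse.zip seg).flatMap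
            (fun p => [p.1, p.2])).take seg.length := by
  intro seg
  induction seg using List.bidirectionalRec with
  | nil => by_cases hd : d > 0 <;> simp [zz, hd]
  | singleton a => by_cases hd : d > 0 <;> simp [zz, hd]
  | cons_append a m b ih =>
    rw [zz_cons_concat, ih]
    have hrev : (a :: (m ++ [b])).reverse = b :: m.reverse ++ [a] := by simp
    have hlen : (a :: (m ++ [b])).length = m.length + 2 := by simp
    have hzip1 : (a :: (m ++ [b])).zip (b :: m.reverse ++ [a])
        = (a, b) :: (m.zip m.reverse ++ [(b, a)]) := by
      show ((a :: m) ++ [b]).zip ((b :: m.reverse) ++ [a]) = _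
      rw [List.zip_append (by simp)]
      simp
    have hzip2 : (b :: m.reverse ++ [a]).zip (a :: (m ++ [b]))
        = (b, a) :: (m.reverse.zip m ++ [(a, b)]) := by
      show ((b :: m.reverse) ++ [a]).zip ((a :: m) ++ [b]) = _
      rw [List.zip_append (by simp)]
      simp
    by_cases hd : d > 0
    · simp only [hd, if_pos, hrev, hlen, hzip1]
      rw [show ((a, b) :: (m.zip m.reverse ++ [(b, a)])).flatMap (fun p => [p.1, p.2])
            = [a, b] ++ (((m.zip m.reverse).flatMap (fun p => [p.1, p.2])) ++ [b, a]) by simp]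
      have hx : m.length ≤ ((m.zip m.reverse).flatMap (fun p => [p.1, p.2])).length := by
        simp [List.length_flatMap]; omega
      rw [show m.length + 2 = (m.length + 1) + 1 from rfl]
      simp [List.take_succ_cons, List.take_append_of_le_length hx]
    · simp only [hd, if_false, hrev, hlen, hzip2]
      rw [show ((b, a) :: (m.reverse.zip m ++ [(a, b)])).flatMap (fun p => [p.1, p.2])
            = [b, a] ++ (((m.reverse.zip m).flatMap (fun p => [p.1, p.2])) ++ [a, b]) by simp]
      have hx : m.length ≤ ((m.reverse.zip m).flatMap (fun p => [p.1, p.2])).length := by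
        simp [List.length_flatMap]; omega
      rw [show m.length + 2 = (m.length + 1) + 1 from rfl]
      simp [List.take_succ_cons, List.take_append_of_le_length hx]

-- ===== VERDICT (by name: the statement is the Claim_ definition above) =====
theorem zigzag_shuffle_py_spec : Claim_equal_zigzag_shuffle_py := by
  intro text direction _
  unfold Spec_zigzag_shuffle_py zigzag_shuffle_py zigzag_shuffle_py_alt
  rw [PySem.Str.slice?_none_none_neg_one]
  by_cases h : PySem.Str.len text ≤ 1
  · rw [if_pos h, if_pos h]
  · rw [if_neg h, if_neg h]
    have hA := zzLoopA_eq direction text.toList [] [] [] 0 (PySem.Str.len text - 1)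
      (by simp) (by simp [PySem.Str.len_eq])
    simp only [List.append_nil, List.nil_append] at hA
    rw [hA, zz_eq_take]
    simp
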